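-- pv_equiv track=rewrite | github.com/MartaSolarz/TSDA | lab2/homework.py | sorted_set_sum
-- ===== SOURCE A (Python) =====
-- def copy(lst):
--     new_lst = []
--     for i in lst:
--         new_lst.append(i)
--     return new_lst
--
-- def set_sum(lst1, lst2):
--     new_lst2 = copy(lst2)
--     for i in lst1:
--         if i not in new_lst2:
--             new_lst2.append(i)
--     return new_lst2
--
-- def sorted_set_sum(lst1, lst2):
--     set_of_lists = set_sum(lst1, lst2)
--     sorted_set_of_lists = []
--     while len(set_of_lists) > 0:
--         min_value = min(set_of_lists)
--         sorted_set_of_lists.append(min_value)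
--         set_of_lists.remove(min_value)
--     return sorted_set_of_lists
-- ===== SOURCE B (Python) =====
-- def sorted_set_sum(lst1, lst2):
--     seen = set(lst2)
--     extras = []
--     for i in lst1:
--         if i not in seen:
--             extras.append(i)
--             seen.add(i)
--     return sorted(lst2 + extras)
-- ===== Notes on version B (the rewrite author's own statement) =====
-- stated objective: faster
-- what changed: Replaces the quadratic list-membership union and the repeated min()/remove() selection sort with a set-based single pass over lst1 followed by one built-in sort.
import Mathlib
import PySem

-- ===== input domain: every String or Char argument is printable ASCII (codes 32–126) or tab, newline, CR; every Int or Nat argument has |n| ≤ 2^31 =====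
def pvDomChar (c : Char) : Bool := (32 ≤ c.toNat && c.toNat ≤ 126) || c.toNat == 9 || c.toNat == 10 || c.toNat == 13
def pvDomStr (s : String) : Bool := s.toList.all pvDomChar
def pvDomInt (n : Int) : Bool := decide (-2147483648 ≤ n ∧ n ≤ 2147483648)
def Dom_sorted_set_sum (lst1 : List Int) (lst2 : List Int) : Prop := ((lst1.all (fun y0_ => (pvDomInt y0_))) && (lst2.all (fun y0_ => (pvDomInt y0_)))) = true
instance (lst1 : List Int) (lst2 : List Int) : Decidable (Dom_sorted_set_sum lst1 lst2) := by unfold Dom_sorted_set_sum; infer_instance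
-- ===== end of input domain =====

-- B replaces A's quadratic membership scans and min/remove selection sort with a set
-- plus one built-in sort; return values are proved equal.

-- ===== PORT A =====
-- copy(lst): new_lst = []; for i in lst: new_lst.append(i)
def pvCopy (lst : List Int) : List Int :=
  lst.foldl (fun acc i => acc ++ [i]) []

-- set_sum(lst1, lst2)
def pvSetSum (lst1 : List Int) (lst2 : List Int) : List Int :=
  lst1.foldl (fun acc i => if i ∈ acc then acc else acc ++ [i]) (pvCopy lst2)

-- while len(l) > 0: m = min(l); out.append(m); l.remove(m)
-- (l.remove(m) removes the first occurrence of m, which is List.erase; exact here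
--  since m = min(l) is a member of l, so Python's remove cannot raise)
def pvSelSort (l : List Int) : List Int :=
  match h : PySem.List.min? l (fun x => x) with
  | none => []
  | some m => m :: pvSelSort (l.erase m)
termination_by l.length
decreasing_by
  have hm : m ∈ l := PySem.List.min?_mem h
  have := List.length_erase_of_mem hm
  have : 0 < l.length := List.length_pos_of_mem hm
  omega

def sorted_set_sum (lst1 : List Int) (lst2 : List Int) : List Int :=
  pvSelSort (pvSetSum lst1 lst2)

-- ===== PORT B =====
def sorted_set_sum_alt (lst1 : List Int) (lst2 : List Int) : List Int :=
  let st := lst1.foldl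
    (fun (p : List Int × PySem.Set Int) i =>
      if i ∈ p.2 then p else (p.1 ++ [i], PySem.Set.add p.2 i))
    ([], PySem.Set.ofList lst2)
  PySem.List.sorted (lst2 ++ st.1) (fun x => x) false

-- ===== PRECONDITION & SPEC =====
def Spec_sorted_set_sum (lst1 : List Int) (lst2 : List Int) (out : List Int) : Prop := out = sorted_set_sum_alt lst1 lst2
instance (lst1 : List Int) (lst2 : List Int) (out : List Int) : Decidable (Spec_sorted_set_sum lst1 lst2 out) := by unfold Spec_sorted_set_sum; infer_instance

-- ===== CLAIM (what is proved, stated in full; the proofs are below) =====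
def Claim_equal_sorted_set_sum : Prop := ∀ (lst1 : List Int) (lst2 : List Int), Dom_sorted_set_sum lst1 lst2 → Spec_sorted_set_sum lst1 lst2 (sorted_set_sum lst1 lst2)

-- ===== LEMMAS AND PROOFS =====

-- A's selection sort computes sorted(l).
theorem sorted_cons_min (l : List Int) (m : Int)
    (hmin : PySem.List.min? l (fun x => x) = some m) :
    PySem.List.sorted l (fun x => x) false =
      m :: PySem.List.sorted (l.erase m) (fun x => x) false := by
  have hm : m ∈ l := PySem.List.min?_mem hmin
  have hle : ∀ y ∈ l, m ≤ y := fun y hy => PySem.List.min?_isMin hmin y hy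
  have hperm : (m :: PySem.List.sorted (l.erase m) (fun x => x) false).Perm l :=
    ((PySem.List.sorted_perm (l.erase m) (fun x => x) false).cons m).trans
      (List.perm_cons_erase hm).symm
  have hpair : (m :: PySem.List.sorted (l.erase m) (fun x => x) false).Pairwise (· ≤ ·) := by
    refine List.pairwise_cons.2 ⟨?_, ?_⟩
    · intro y hy
      exact hle y (l.erase_subset ((PySem.List.mem_sorted _ _ _ _).1 hy))
    · exact PySem.List.sorted_pairwise (l.erase m) (fun x => x)
  exact PySem.List.sorted_id_eq_of_perm_of_pairwise _ _ hperm hpair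

theorem pvSelSort_eq_sorted (l : List Int) :
    pvSelSort l = PySem.List.sorted l (fun x => x) false := by
  rw [pvSelSort]
  split
  · next hmin =>
      have hl : l = [] := (PySem.List.min?_eq_none_iff l (fun x => x)).1 hmin
      subst hl
      simp [PySem.List.sorted]
  · next m hmin =>
      rw [sorted_cons_min l m hmin]
      have hm : m ∈ l := PySem.List.min?_mem hmin
      have hlt : (l.erase m).length < l.length := by
        have := List.length_erase_of_mem hm
        have := List.length_pos_of_mem hm
        omega
      exact congrArg (m :: ·) (pvSelSort_eq_sorted (l.erase m))
termination_by l.length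

-- A's fold over lst1 and B's fold over lst1 keep the same list, split as base ++ extras,
-- as long as `seen` has exactly the members of base ++ extras.
theorem fold_invariant (l1 : List Int) (base extras : List Int) (seen : PySem.Set Int)
    (h : ∀ x : Int, x ∈ seen ↔ x ∈ base ++ extras) :
    l1.foldl (fun acc i => if i ∈ acc then acc else acc ++ [i]) (base ++ extras) =
      base ++ (l1.foldl
        (fun (p : List Int × PySem.Set Int) i =>
          if i ∈ p.2 then p else (p.1 ++ [i], PySem.Set.add p.2 i))
        (extras, seen)).1 := by
  induction l1 generalizing extras seen with
  | nil => simp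
  | cons i t ih =>
      simp only [List.foldl_cons]
      by_cases hi : i ∈ seen
      · have hib : i ∈ base ++ extras := (h i).1 hi
        simp only [hib, if_pos, hi]
        exact ih extras seen h
      · have hib : i ∉ base ++ extras := fun hc => hi ((h i).2 hc)
        simp only [hib, hi, if_false]
        rw [List.append_assoc]
        refine ih (extras ++ [i]) (PySem.Set.add seen i) ?_
        intro x
        simp only [PySem.Set.mem_add, h x, List.mem_append, List.mem_singleton]
        tauto

-- ===== VERDICT (by name: the statement is the Claim_ definition above) =====
theorem sorted_set_sum_spec : Claim_equal_sorted_set_sum := by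
  intro lst1 lst2 _
  unfold Spec_sorted_set_sum sorted_set_sum sorted_set_sum_alt pvSetSum
  have hcopy : pvCopy lst2 = lst2 := by
    unfold pvCopy; rw [PySem.List.foldl_append_singleton]; simp
  rw [hcopy, pvSelSort_eq_sorted]
  have hinv := fold_invariant lst1 lst2 [] (PySem.Set.ofList lst2)
    (by intro x; simp [PySem.Set.mem_ofList])
  simp at hinv
  rw [hinv]
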